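-- pv_equiv track=rewrite | github.com/amygee1209/baekjun | 프로그래머스/2/131127. 할인 행사/할인 행사.py | solution
-- ===== SOURCE A (Python) =====
-- def solution(want, number, discount):
--
--     myWantCount = {}
--     for i in range(len(want)):
--         myWantCount[want[i]] = number[i]
--
--     numOfDays = 0
--
--     N = len(discount)
--     discountItemCount = {}
--     for discountItem in discount[:10]:
--         discountItemCount[discountItem] = discountItemCount.get(discountItem, 0) + 1
--
--     for i in range(N-9):
--         validDay = True
--         for want, number in myWantCount.items():
--             if number > discountItemCount.get(want, 0):
--                 validDay = False
--                 break
--         if validDay: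
--             numOfDays += 1
--         if (i+10) < N:
--             discountItemCount[discount[i]] -= 1
--             discountItemCount[discount[i+10]] = discountItemCount.get(discount[i+10], 0) + 1
--
--     return numOfDays
-- ===== SOURCE B (Python) =====
-- def solution(want, number, discount):
--     need = {}
--     for w, n in zip(want, number):
--         need[w] = n
--     total = len(need)
--     cnt = {}
--     satisfied = 0
--     for k, n in need.items():
--         cnt[k] = 0
--         if n <= 0:
--             satisfied += 1
--     days = 0
--     N = len(discount)
--     for item in discount[:10]:
--         if item in need:
--             cnt[item] += 1
--             if cnt[item] == need[item]:
--                 satisfied += 1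
--     for i in range(N - 9):
--         if satisfied == total:
--             days += 1
--         if i + 10 < N:
--             out = discount[i]
--             if out in need:
--                 if cnt[out] == need[out]:
--                     satisfied -= 1
--                 cnt[out] -= 1
--             inc = discount[i + 10]
--             if inc in need:
--                 cnt[inc] += 1
--                 if cnt[inc] == need[inc]:
--                     satisfied += 1
--     return days
-- ===== Notes on version B (the rewrite author's own statement) =====
-- stated objective: faster
-- what changed: B replaces A's per-window rescan of every wanted item with a sliding window that maintains a single 'satisfied' counter (number of wanted items currently meeting their threshold), updated in O(1) per shift, so the inner loop over wants disappears.
import Mathlib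
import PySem

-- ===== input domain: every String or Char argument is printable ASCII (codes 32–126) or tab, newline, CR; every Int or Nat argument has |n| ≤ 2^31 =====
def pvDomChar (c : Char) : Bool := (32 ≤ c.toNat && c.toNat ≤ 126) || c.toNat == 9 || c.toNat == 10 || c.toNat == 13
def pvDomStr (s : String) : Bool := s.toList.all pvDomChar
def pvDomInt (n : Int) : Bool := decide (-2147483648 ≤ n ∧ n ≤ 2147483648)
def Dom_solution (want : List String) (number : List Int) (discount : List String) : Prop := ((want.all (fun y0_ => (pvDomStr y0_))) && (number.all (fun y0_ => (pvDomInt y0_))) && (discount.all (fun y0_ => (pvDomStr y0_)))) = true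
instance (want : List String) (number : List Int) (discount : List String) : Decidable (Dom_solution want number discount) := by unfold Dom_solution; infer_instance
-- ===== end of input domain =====

-- B: sliding window with an incrementally maintained count of satisfied wanted items (no per-window rescan); Pre_ excludes the inputs where A raises IndexError.


-- ===== PORT A =====
-- the inner 'for want, number in myWantCount.items(): … break' loop of A
def checkValidA : List (String × Int) → PySem.Dict String Int → Bool
  | [], _ => true
  | (w, n) :: rest, dc => if dc.getD w 0 < n then false else checkValidA rest dc

-- the body of A's 'for i in range(N-9)' loop, on the state (numOfDays, discountItemCount)
def stepA (myWantCount : PySem.Dict String Int) (N : Int) (discount : List String)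
    (st : Int × PySem.Dict String Int) (i : Int) : Int × PySem.Dict String Int :=
  let numOfDays := if checkValidA myWantCount.items st.2 then st.1 + 1 else st.1
  if i + 10 < N then
    -- discountItemCount[discount[i]] -= 1  (the key is always present here, so getD is exact)
    let d1 := st.2.insert (PySem.List.pyGetD discount i "")
                (st.2.getD (PySem.List.pyGetD discount i "") 0 - 1)
    let d2 := d1.insert (PySem.List.pyGetD discount (i + 10) "")
                (d1.getD (PySem.List.pyGetD discount (i + 10) "") 0 + 1)
    (numOfDays, d2)
  else (numOfDays, st.2)

def solution (want : List String) (number : List Int) (discount : List String) : Int :=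
  let myWantCount : PySem.Dict String Int :=
    (PySem.List.pyRange 0 (PySem.List.len want) 1).foldl
      (fun d i => d.insert (PySem.List.pyGetD want i "") (PySem.List.pyGetD number i 0)) PySem.Dict.empty
  let N : Int := PySem.List.len discount
  let discountItemCount : PySem.Dict String Int :=
    (PySem.List.slice discount none (some 10)).foldl
      (fun d item => d.insert item (d.getD item 0 + 1)) PySem.Dict.empty
  ((PySem.List.pyRange 0 (N - 9) 1).foldl (stepA myWantCount N discount) (0, discountItemCount)).1

-- ===== PORT B =====
-- the body of B's 'for i in range(N - 9)' loop, on the state (days, cnt, satisfied)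
def stepB (need : PySem.Dict String Int) (total : Int) (N : Int) (discount : List String)
    (st : Int × PySem.Dict String Int × Int) (i : Int) : Int × PySem.Dict String Int × Int :=
  let days := if st.2.2 == total then st.1 + 1 else st.1
  if i + 10 < N then
    let out := PySem.List.pyGetD discount i ""
    let mid :=
      if need.contains out then
        (st.2.1.insert out (st.2.1.getD out 0 - 1),
         if st.2.1.getD out 0 == need.getD out 0 then st.2.2 - 1 else st.2.2)
      else st.2
    let inc := PySem.List.pyGetD discount (i + 10) ""
    if need.contains inc then
      let cnt2 := mid.1.insert inc (mid.1.getD inc 0 + 1)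
      (days, cnt2, if cnt2.getD inc 0 == need.getD inc 0 then mid.2 + 1 else mid.2)
    else (days, mid)
  else (days, st.2)

-- the body of B's first-window loop 'for item in discount[:10]', on the state (cnt, satisfied)
def stepB0 (need : PySem.Dict String Int) (st : PySem.Dict String Int × Int) (item : String) :
    PySem.Dict String Int × Int :=
  if need.contains item then
    let cnt := st.1.insert item (st.1.getD item 0 + 1)
    (cnt, if cnt.getD item 0 == need.getD item 0 then st.2 + 1 else st.2)
  else st

def solution_alt (want : List String) (number : List Int) (discount : List String) : Int :=
  let need : PySem.Dict String Int := (want.zip number).foldl (fun d p => d.insert p.1 p.2) PySem.Dict.empty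
  let total : Int := need.size
  let init := need.items.foldl
    (fun (st : PySem.Dict String Int × Int) p =>
      (st.1.insert p.1 0, if p.2 ≤ 0 then st.2 + 1 else st.2))
    (PySem.Dict.empty, 0)
  let N : Int := PySem.List.len discount
  let st1 := (PySem.List.slice discount none (some 10)).foldl (stepB0 need) init
  ((PySem.List.pyRange 0 (N - 9) 1).foldl (stepB need total N discount) (0, st1.1, st1.2)).1

-- ===== PRECONDITION & SPEC =====
-- Pre_ excludes exactly the inputs where A raises IndexError: number shorter than want.
def Pre_solution (want : List String) (number : List Int) (discount : List String) : Prop :=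
  want.length ≤ number.length
instance (want : List String) (number : List Int) (discount : List String) : Decidable (Pre_solution want number discount) := by unfold Pre_solution; infer_instance

def pvWitness_solution : List String × List Int × List String :=
  (["a", "b"], [2, 1], ["a", "a", "b", "c", "a", "b", "a", "b", "c", "a", "b", "a"])

def Spec_solution (want : List String) (number : List Int) (discount : List String) (out : Int) : Prop := out = solution_alt want number discount
instance (want : List String) (number : List Int) (discount : List String) (out : Int) : Decidable (Spec_solution want number discount out) := by unfold Spec_solution; infer_instance

-- ===== CLAIM (what is proved, stated in full; the proofs are below) =====
def Claim_equal_solution : Prop := ∀ (want : List String) (number : List Int) (discount : List String), Dom_solution want number discount → Pre_solution want number discount → Spec_solution want number discount (solution want number discount)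

-- ===== LEMMAS AND PROOFS =====

-- count of item k in the 10-day window starting at day i
def pvWinCnt (discount : List String) (i : Nat) (k : String) : Int :=
  (((discount.drop i).take 10).count k : Int)

-- window i satisfies every wanted pair
def pvOK (need : List (String × Int)) (discount : List String) (i : Int) : Bool :=
  need.all (fun p => decide (p.2 ≤ pvWinCnt discount i.toNat p.1))

-- the wanted-quantities dict both programs build
def pvNeed (want : List String) (number : List Int) : PySem.Dict String Int :=
  (want.zip number).foldl (fun d p => d.insert p.1 p.2) PySem.Dict.empty

theorem foldl_range_zip (xs : List String) : ∀ (ys : List Int) (d : PySem.Dict String Int), xs.length ≤ ys.length →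
    (List.range xs.length).foldl (fun d k => d.insert (xs.getD k "") (ys.getD k 0)) d
      = (xs.zip ys).foldl (fun d p => d.insert p.1 p.2) d := by
  induction xs with
  | nil => intro ys d h; simp
  | cons x xs ih =>
    intro ys d h
    cases ys with
    | nil => simp at h
    | cons y ys =>
      simp only [List.length_cons]
      rw [List.range_succ_eq_map]
      simp only [List.foldl_cons, List.foldl_map, List.getD_cons_zero, List.getD_cons_succ, List.zip_cons_cons]
      exact ih ys _ (by simpa using h)

theorem myWantCount_eq (want : List String) (number : List Int) (h : want.length ≤ number.length) :
    (PySem.List.pyRange 0 ((want.length : Nat) : Int) 1).foldl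
      (fun d i => d.insert (PySem.List.pyGetD want i "") (PySem.List.pyGetD number i 0)) PySem.Dict.empty
    = pvNeed want number := by
  rw [PySem.List.pyRange_zero_nat, List.foldl_map]
  simp only [PySem.List.pyGetD_natCast]
  exact foldl_range_zip want number PySem.Dict.empty h

-- flipping the satisfied-count when one key's count goes up by one
theorem countP_succ_at (f g : String → Int) (x : String)
    (hg : ∀ k, k ≠ x → g k = f k) (hx : g x = f x + 1) :
    ∀ (items : List (String × Int)),
    (items.countP (fun p => decide (p.2 ≤ g p.1)) : Int)
      = (items.countP (fun p => decide (p.2 ≤ f p.1)) : Int) + items.count (x, f x + 1) := by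
  intro items
  induction items with
  | nil => simp
  | cons p rest ih =>
    obtain ⟨k, v⟩ := p
    simp only [List.countP_cons, List.count_cons, beq_iff_eq, Prod.mk.injEq]
    push_cast
    rw [ih]
    by_cases hk : k = x
    · subst hk
      by_cases hv : v = f k + 1
      · simp [hv, hx]; ring
      · have h1 : (decide (v ≤ g k) : Bool) = decide (v ≤ f k) := by
          rw [hx] at *; by_cases h2 : v ≤ f k <;> simp_all <;> omega
        simp [h1, hv]
        omega
    · rw [hg k hk]
      simp [hk]
      omega

theorem checkValidA_eq (items : List (String × Int)) (dc : PySem.Dict String Int) :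
    checkValidA items dc = items.all (fun p => decide (p.2 ≤ dc.getD p.1 0)) := by
  induction items with
  | nil => rfl
  | cons p rest ih =>
    obtain ⟨w, n⟩ := p
    by_cases h : dc.getD w 0 < n
    · simp [checkValidA, h]
    · simp [checkValidA, h, ih]; omega

theorem get?_of_getD (d : PySem.Dict String Int) (x : String) (hx : x ∈ d.keys) :
    d.get? x = some (d.getD x 0) := by
  have hc : d.contains x = true := (PySem.Dict.contains_iff_mem_keys d x).2 hx
  rw [PySem.Dict.contains_eq_isSome_get?] at hc
  obtain ⟨w, hw⟩ := Option.isSome_iff_exists.1 hc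
  rw [PySem.Dict.getD_eq_get?_getD, hw]
  rfl

theorem count_pair (d : PySem.Dict String Int) (hnd : d.keys.Nodup) (x : String) (v : Int)
    (hx : x ∈ d.keys) :
    (d.items.count (x, v) : Int) = if d.getD x 0 = v then 1 else 0 := by
  have hib : d.items.Nodup := List.Nodup.of_map Prod.fst hnd
  by_cases h : d.getD x 0 = v
  · have hget : d.get? x = some v := by rw [get?_of_getD d x hx, h]
    have hmem : (x, v) ∈ d.items := (PySem.Dict.get?_eq_some_iff_mem_items d x v hnd).1 hget
    simp [h, List.count_eq_one_of_mem hib hmem]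
  · have hnm : (x, v) ∉ d.items := by
      intro hm
      exact h (PySem.Dict.getD_of_mem_items d hm hnd 0)
    simp [h, List.count_eq_zero_of_not_mem hnm]

theorem winCnt_shift (discount : List String) (a : Nat) (h : a + 10 < discount.length) (k : String) :
    pvWinCnt discount (a+1) k = pvWinCnt discount a k
      - (if k = discount[a]'(by omega) then 1 else 0)
      + (if k = discount[a+10]'(by omega) then 1 else 0) := by
  unfold pvWinCnt
  have h1 : discount.drop a = discount[a]'(by omega) :: discount.drop (a+1) :=
    List.drop_eq_getElem_cons (by omega)
  have h2 : (discount.drop (a+1)).take 10 = (discount.drop (a+1)).take 9 ++ [discount[a+10]'(by omega)] := by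
    have h3 : (discount.drop (a+1))[9]? = some (discount[a+10]'(by omega)) := by
      rw [List.getElem?_drop]
      exact List.getElem?_eq_getElem (by omega)
    have := List.take_add_one (l := discount.drop (a+1)) (i := 9)
    rw [h3] at this
    simpa using this
  have e1 : (discount.drop a).take 10 = discount[a]'(by omega) :: (discount.drop (a+1)).take 9 := by
    rw [h1]
    rfl
  rw [e1, h2]
  simp only [List.count_append, List.count_cons, List.count_nil, beq_iff_eq]
  push_cast
  by_cases hx : k = discount[a]'(by omega) <;> by_cases hy : k = discount[a+10]'(by omega) <;>
    simp [hx, hy, eq_comm] <;> omega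

theorem A_loop (need : PySem.Dict String Int) (discount : List String) :
    ∀ (n : Nat) (a days : Int) (dc : PySem.Dict String Int), 0 ≤ a →
    n = (((discount.length : Int) - 9) - a).toNat →
    (∀ k, dc.getD k 0 = pvWinCnt discount a.toNat k) →
    ((PySem.List.pyRange a ((discount.length : Int) - 9) 1).foldl
      (stepA need (discount.length : Int) discount) (days, dc)).1
    = days + ((PySem.List.pyRange a ((discount.length : Int) - 9) 1).countP (pvOK need.items discount) : Int) := by
  intro n
  induction n with
  | zero =>
    intro a days dc ha hn hinv
    rw [PySem.List.pyRange_one_eq_nil (by omega)]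
    simp
  | succ n ih =>
    intro a days dc ha hn hinv
    have hlt : a < (discount.length : Int) - 9 := by omega
    rw [PySem.List.pyRange_one_cons hlt]
    simp only [List.foldl_cons, List.countP_cons]
    have hcv : checkValidA need.items dc = pvOK need.items discount a := by
      rw [checkValidA_eq]
      unfold pvOK
      simp only [hinv]
    by_cases hsh : a + 10 < (discount.length : Int)
    · have hstep : stepA need (discount.length : Int) discount (days, dc) a
          = ((if pvOK need.items discount a then days + 1 else days),
             (dc.insert (PySem.List.pyGetD discount a "") (dc.getD (PySem.List.pyGetD discount a "") 0 - 1)).insert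
               (PySem.List.pyGetD discount (a + 10) "")
               ((dc.insert (PySem.List.pyGetD discount a "") (dc.getD (PySem.List.pyGetD discount a "") 0 - 1)).getD
                 (PySem.List.pyGetD discount (a + 10) "") 0 + 1)) := by
        unfold stepA
        simp only [hcv, hsh, if_true]
      rw [hstep]
      have hax : a.toNat + 10 < discount.length := by omega
      have hga : PySem.List.pyGetD discount a "" = discount[a.toNat]'(by omega) :=
        PySem.List.pyGetD_eq_getElem discount "" ha (by omega)
      have hgb : PySem.List.pyGetD discount (a + 10) "" = discount[a.toNat + 10]'(by omega) := by
        rw [PySem.List.pyGetD_eq_getElem discount "" (by omega) (by push_cast; omega)]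
        congr 1
        omega
      have hinv' : ∀ k,
          ((dc.insert (PySem.List.pyGetD discount a "") (dc.getD (PySem.List.pyGetD discount a "") 0 - 1)).insert
            (PySem.List.pyGetD discount (a + 10) "")
            ((dc.insert (PySem.List.pyGetD discount a "") (dc.getD (PySem.List.pyGetD discount a "") 0 - 1)).getD
              (PySem.List.pyGetD discount (a + 10) "") 0 + 1)).getD k 0
          = pvWinCnt discount (a + 1).toNat k := by
        intro k
        have hto : (a + 1).toNat = a.toNat + 1 := by omega
        rw [hto, winCnt_shift discount a.toNat hax k]
        rw [hga, hgb]
        simp only [PySem.Dict.getD_insert, hinv]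
        split_ifs <;> simp_all <;> omega
      rw [ih (a + 1) _ _ (by omega) (by omega) hinv']
      by_cases hok : pvOK need.items discount a = true <;> simp [hok] <;> push_cast <;> ring
    · have hstep : stepA need (discount.length : Int) discount (days, dc) a
          = ((if pvOK need.items discount a then days + 1 else days), dc) := by
        unfold stepA
        simp only [hcv, hsh, if_false]
      rw [hstep]
      have hnil : PySem.List.pyRange (a + 1) ((discount.length : Int) - 9) = [] :=
        PySem.List.pyRange_one_eq_nil (by omega)
      rw [hnil]
      simp only [List.foldl_nil, List.countP_nil]
      by_cases hok : pvOK need.items discount a = true <;> simp [hok]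

theorem solution_eq_spec (want : List String) (number : List Int) (discount : List String)
    (h : want.length ≤ number.length) :
    solution want number discount =
      ((PySem.List.pyRange 0 ((discount.length : Int) - 9) 1).countP
        (pvOK (pvNeed want number).items discount) : Int) := by
  unfold solution
  simp only [PySem.List.len_eq]
  rw [myWantCount_eq want number h]
  rw [PySem.List.slice_to discount (by norm_num), PySem.Dict.foldl_insert_getD_add_one_eq_counter]
  have hinv : ∀ k, (PySem.Dict.counter (discount.take (10:Int).toNat)).getD k 0 = pvWinCnt discount (0:Int).toNat k := by
    intro k
    rw [PySem.Dict.getD_counter]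
    unfold pvWinCnt
    rw [show (0:Int).toNat = 0 from rfl, List.drop_zero, show (10:Int).toNat = 10 from rfl]
  rw [A_loop (pvNeed want number) discount (((discount.length : Int) - 9) - 0).toNat 0 0 _ (by omega) rfl hinv]
  omega


theorem pvNeed_nodup (want : List String) (number : List Int) : (pvNeed want number).keys.Nodup :=
  PySem.Dict.nodup_keys_foldl_insert_key (want.zip number) Prod.fst (fun _ p => p.2)
    PySem.Dict.empty PySem.Dict.nodup_keys_empty

theorem getD_foldl_insert_zero (l : List (String × Int)) :
    ∀ (d : PySem.Dict String Int), (∀ k, d.getD k 0 = 0) →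
    ∀ k, (l.foldl (fun (d : PySem.Dict String Int) p => d.insert p.1 0) d).getD k 0 = 0 := by
  induction l with
  | nil => intro d h k; exact h k
  | cons p rest ih =>
    intro d h k
    refine ih _ (fun k' => ?_) k
    rw [PySem.Dict.getD_insert]
    split_ifs <;> simp [h]

-- the incremental 'satisfied += 1' update is exact when one key's count rises by one
theorem sat_up (need : PySem.Dict String Int) (hnd : need.keys.Nodup) (f g : String → Int)
    (x : String) (hx : x ∈ need.keys)
    (hg : ∀ k, k ≠ x → g k = f k) (hxx : g x = f x + 1) (s : Int)
    (hs : s = (need.items.countP (fun p => decide (p.2 ≤ f p.1)) : Int)) :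
    (if g x == need.getD x 0 then s + 1 else s)
      = (need.items.countP (fun p => decide (p.2 ≤ g p.1)) : Int) := by
  rw [hs, countP_succ_at f g x hg hxx need.items, count_pair need hnd x (f x + 1) hx, hxx]
  by_cases h : need.getD x 0 = f x + 1 <;> simp [h, beq_iff_eq] <;> omega

-- and the 'satisfied -= 1' update when one key's count drops by one
theorem sat_down (need : PySem.Dict String Int) (hnd : need.keys.Nodup) (f g : String → Int)
    (x : String) (hx : x ∈ need.keys)
    (hg : ∀ k, k ≠ x → g k = f k) (hxx : f x = g x + 1) (s : Int)
    (hs : s = (need.items.countP (fun p => decide (p.2 ≤ f p.1)) : Int)) :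
    (if f x == need.getD x 0 then s - 1 else s)
      = (need.items.countP (fun p => decide (p.2 ≤ g p.1)) : Int) := by
  have h := sat_up need hnd g f x hx (fun k hk => (hg k hk).symm) hxx
    ((need.items.countP (fun p => decide (p.2 ≤ g p.1)) : Int)) rfl
  by_cases hc : f x == need.getD x 0 <;> simp [hc] at h ⊢ <;> omega

-- a key outside the dict never changes the satisfied count
theorem countP_off (need : PySem.Dict String Int) (f g : String → Int) (x : String)
    (hx : x ∉ need.keys) (hg : ∀ k, k ≠ x → g k = f k) :
    need.items.countP (fun p => decide (p.2 ≤ g p.1))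
      = need.items.countP (fun p => decide (p.2 ≤ f p.1)) := by
  refine List.countP_congr (fun p hp => ?_)
  have : p.1 ≠ x := fun he => hx (he ▸ PySem.Dict.mem_keys_of_mem_items need hp)
  rw [hg p.1 this]

theorem B0_loop (need : PySem.Dict String Int) (hnd : need.keys.Nodup) :
    ∀ (w pre : List String) (cnt : PySem.Dict String Int) (sat : Int),
    (∀ k ∈ need.keys, cnt.getD k 0 = (pre.count k : Int)) →
    sat = (need.items.countP (fun p => decide (p.2 ≤ (pre.count p.1 : Int))) : Int) →
    (∀ k ∈ need.keys, (w.foldl (stepB0 need) (cnt, sat)).1.getD k 0 = (((pre ++ w).count k : Nat) : Int))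
    ∧ (w.foldl (stepB0 need) (cnt, sat)).2
        = (need.items.countP (fun p => decide (p.2 ≤ (((pre ++ w).count p.1 : Nat) : Int))) : Int) := by
  intro w
  induction w with
  | nil =>
    intro pre cnt sat hcnt hsat
    simpa using ⟨hcnt, hsat⟩
  | cons x w ih =>
    intro pre cnt sat hcnt hsat
    have hshape : (x :: w).foldl (stepB0 need) (cnt, sat) = w.foldl (stepB0 need) (stepB0 need (cnt, sat) x) := rfl
    by_cases hc : need.contains x
    · have hxk : x ∈ need.keys := (PySem.Dict.contains_iff_mem_keys need x).1 hc
      have hstep : stepB0 need (cnt, sat) x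
          = (cnt.insert x (cnt.getD x 0 + 1),
             if cnt.getD x 0 + 1 == need.getD x 0 then sat + 1 else sat) := by
        unfold stepB0
        simp [hc, PySem.Dict.getD_insert]
      have hcnt' : ∀ k ∈ need.keys,
          (cnt.insert x (cnt.getD x 0 + 1)).getD k 0 = ((pre ++ [x]).count k : Int) := by
        intro k hk
        rw [PySem.Dict.getD_insert]
        rcases eq_or_ne k x with rfl | hne
        · simp [hcnt k hk, List.count_append]
        · simp [hcnt k hk, List.count_append, List.count_singleton, hne, Ne.symm hne]
      have hsat' : (if cnt.getD x 0 + 1 == need.getD x 0 then sat + 1 else sat)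
          = (need.items.countP (fun p => decide (p.2 ≤ ((pre ++ [x]).count p.1 : Int))) : Int) := by
        have hgx : ((pre ++ [x]).count x : Int) = (pre.count x : Int) + 1 := by
          simp [List.count_append]
        have := sat_up need hnd (fun k => (pre.count k : Int)) (fun k => ((pre ++ [x]).count k : Int)) x hxk
          (fun k hk => by simp [List.count_append, List.count_singleton, hk, Ne.symm hk]) hgx sat hsat
        rw [← this]
        simp only [hgx, hcnt x hxk]
      have := ih (pre ++ [x]) _ _ hcnt' hsat'
      have heq : pre ++ x :: w = (pre ++ [x]) ++ w := by simp
      rw [hshape, hstep, heq]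
      exact this
    · have hxk : x ∉ need.keys := fun hm => hc ((PySem.Dict.contains_iff_mem_keys need x).2 hm)
      have hstep : stepB0 need (cnt, sat) x = (cnt, sat) := by
        unfold stepB0
        simp [hc]
      have hcnt' : ∀ k ∈ need.keys, cnt.getD k 0 = ((pre ++ [x]).count k : Int) := by
        intro k hk
        have hne : k ≠ x := fun he => hxk (he ▸ hk)
        simp [hcnt k hk, List.count_append, List.count_singleton, hne, Ne.symm hne]
      have hsat' : sat = (need.items.countP (fun p => decide (p.2 ≤ ((pre ++ [x]).count p.1 : Int))) : Int) := by
        rw [hsat, countP_off need (fun k => (pre.count k : Int)) (fun k => ((pre ++ [x]).count k : Int)) x hxk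
          (fun k hk => by simp [List.count_append, List.count_singleton, hk, Ne.symm hk])]
      have := ih (pre ++ [x]) _ _ hcnt' hsat'
      have heq : pre ++ x :: w = (pre ++ [x]) ++ w := by simp
      rw [hshape, hstep, heq]
      exact this


-- 'satisfied == total' is exactly the all-wants-met test
theorem sat_total (need : PySem.Dict String Int) (f : String → Int) :
    (((need.items.countP (fun p => decide (p.2 ≤ f p.1)) : Int)) == (need.size : Int))
      = need.items.all (fun p => decide (p.2 ≤ f p.1)) := by
  have hsz : (need.size : Int) = (need.items.length : Int) := rfl
  rw [hsz]
  by_cases h : List.countP (fun p => decide (p.2 ≤ f p.1)) need.items = need.items.length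
  · have h2 : need.items.all (fun p => decide (p.2 ≤ f p.1)) = true := by
      rw [List.all_eq_true]
      exact List.countP_eq_length.1 h
    rw [h2]
    simp [h]
  · have h2 : need.items.all (fun p => decide (p.2 ≤ f p.1)) = false := by
      rw [Bool.eq_false_iff]
      intro hT
      exact h (List.countP_eq_length.2 (List.all_eq_true.1 hT))
    rw [h2]
    simp only [beq_eq_false_iff_ne, ne_eq, Int.natCast_inj]
    exact h

theorem B_loop (need : PySem.Dict String Int) (hnd : need.keys.Nodup) (discount : List String) :
    ∀ (n : Nat) (a days : Int) (cnt : PySem.Dict String Int) (sat : Int), 0 ≤ a →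
    n = (((discount.length : Int) - 9) - a).toNat →
    (∀ k ∈ need.keys, cnt.getD k 0 = pvWinCnt discount a.toNat k) →
    sat = (need.items.countP (fun p => decide (p.2 ≤ pvWinCnt discount a.toNat p.1)) : Int) →
    ((PySem.List.pyRange a ((discount.length : Int) - 9) 1).foldl
      (stepB need (need.size : Int) (discount.length : Int) discount) (days, cnt, sat)).1
    = days + ((PySem.List.pyRange a ((discount.length : Int) - 9) 1).countP (pvOK need.items discount) : Int) := by
  intro n
  induction n with
  | zero =>
    intro a days cnt sat ha hn hcnt hsat
    rw [PySem.List.pyRange_one_eq_nil (by omega)]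
    simp
  | succ n ih =>
    intro a days cnt sat ha hn hcnt hsat
    have hlt : a < (discount.length : Int) - 9 := by omega
    rw [PySem.List.pyRange_one_cons hlt]
    simp only [List.foldl_cons, List.countP_cons]
    have hdays : (sat == (need.size : Int)) = pvOK need.items discount a := by
      rw [hsat, sat_total]
      rfl
    by_cases hsh : a + 10 < (discount.length : Int)
    · -- window shifts
      have hax : a.toNat + 10 < discount.length := by omega
      have hga : PySem.List.pyGetD discount a "" = discount[a.toNat]'(by omega) :=
        PySem.List.pyGetD_eq_getElem discount "" ha (by omega)
      have hgb : PySem.List.pyGetD discount (a + 10) "" = discount[a.toNat + 10]'(by omega) := by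
        rw [PySem.List.pyGetD_eq_getElem discount "" (by omega) (by push_cast; omega)]
        congr 1
        omega
      -- abbreviations
      set f := pvWinCnt discount a.toNat with hf
      set o := discount[a.toNat]'(by omega) with ho
      set e := discount[a.toNat + 10]'(by omega) with he
      have hg2 : ∀ k, pvWinCnt discount (a + 1).toNat k
          = f k - (if k = o then 1 else 0) + (if k = e then 1 else 0) := by
        intro k
        have hto : (a + 1).toNat = a.toNat + 1 := by omega
        rw [hto, winCnt_shift discount a.toNat hax k]
      -- the intermediate state after removing discount[i]
      set m : PySem.Dict String Int × Int :=
        (if need.contains o then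
          (cnt.insert o (cnt.getD o 0 - 1),
           if cnt.getD o 0 == need.getD o 0 then sat - 1 else sat)
         else (cnt, sat)) with hm
      have hmid : (∀ k ∈ need.keys, m.1.getD k 0 = f k - (if k = o then 1 else 0))
          ∧ m.2 = (need.items.countP (fun p => decide (p.2 ≤ f p.1 - (if p.1 = o then 1 else 0))) : Int) := by
        rw [hm]
        by_cases hc : need.contains o
        · have hok : o ∈ need.keys := (PySem.Dict.contains_iff_mem_keys need o).1 hc
          constructor
          · intro k hk
            simp only [hc, if_true, PySem.Dict.getD_insert]
            rcases eq_or_ne k o with rfl | hne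
            · simp [hcnt _ hk]
            · simp [hne, hcnt _ hk]
          · simp only [hc, if_true]
            have := sat_down need hnd f (fun k => f k - (if k = o then 1 else 0)) o hok
              (fun k hk => by simp [hk]) (by simp) sat hsat
            rw [← this, hcnt o hok]
        · have hok : o ∉ need.keys := fun hm => hc ((PySem.Dict.contains_iff_mem_keys need o).2 hm)
          constructor
          · intro k hk
            have hne : k ≠ o := fun hh => hok (hh ▸ hk)
            simp [hc, hcnt k hk, hne]
          · simp only [hc, if_false]
            rw [hsat, countP_off need f (fun k => f k - (if k = o then 1 else 0)) o hok
              (fun k hk => by simp [hk])]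
            simp
      have hstep : stepB need (need.size : Int) (discount.length : Int) discount (days, cnt, sat) a
          = ((if pvOK need.items discount a then days + 1 else days),
             if need.contains e then
               (m.1.insert e (m.1.getD e 0 + 1),
                if m.1.getD e 0 + 1 == need.getD e 0 then m.2 + 1 else m.2)
             else m) := by
        unfold stepB
        simp only [hdays, hsh, if_true, hga, hgb, PySem.Dict.getD_insert, ← hm, if_pos rfl]
        split_ifs <;> rfl
      rw [hstep]
      by_cases hce : need.contains e
      · have hek : e ∈ need.keys := (PySem.Dict.contains_iff_mem_keys need e).1 hce
        have hcnt2 : ∀ k ∈ need.keys,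
            (m.1.insert e (m.1.getD e 0 + 1)).getD k 0 = pvWinCnt discount (a + 1).toNat k := by
          intro k hk
          rw [hg2 k, PySem.Dict.getD_insert]
          rcases eq_or_ne k e with rfl | hne
          · simp [hmid.1 _ hk]
          · simp [hne, hmid.1 k hk]
        have hsat2 : (if m.1.getD e 0 + 1 == need.getD e 0 then m.2 + 1 else m.2)
            = (need.items.countP (fun p => decide (p.2 ≤ pvWinCnt discount (a + 1).toNat p.1)) : Int) := by
          have hup := sat_up need hnd (fun k => f k - (if k = o then 1 else 0))
            (fun k => f k - (if k = o then 1 else 0) + (if k = e then 1 else 0)) e hek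
            (fun k hk => by simp [hk]) (by simp) m.2 hmid.2
          have hconv : need.items.countP (fun p => decide (p.2 ≤ (fun k => (f k - if k = o then 1 else 0) + if k = e then 1 else 0) p.1))
              = need.items.countP (fun p => decide (p.2 ≤ pvWinCnt discount (a + 1).toNat p.1)) :=
            List.countP_congr (fun p _ => by simp [hg2 p.1])
          rw [hconv] at hup
          have hcond : ((fun k => (f k - if k = o then 1 else 0) + if k = e then 1 else 0) e) = m.1.getD e 0 + 1 := by
            simp [hmid.1 e hek]
          rw [hcond] at hup
          exact hup
        simp only [hce, if_true]
        rw [ih (a + 1) _ _ _ (by omega) (by omega) hcnt2 hsat2]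
        by_cases hok : pvOK need.items discount a = true <;> simp [hok] <;> push_cast <;> ring
      · have hek : e ∉ need.keys := fun hmm => hce ((PySem.Dict.contains_iff_mem_keys need e).2 hmm)
        have hcnt2 : ∀ k ∈ need.keys, m.1.getD k 0 = pvWinCnt discount (a + 1).toNat k := by
          intro k hk
          have hne : k ≠ e := fun hh => hek (hh ▸ hk)
          rw [hg2 k, hmid.1 k hk]
          simp [hne]
        have hsat2 : m.2 = (need.items.countP (fun p => decide (p.2 ≤ pvWinCnt discount (a + 1).toNat p.1)) : Int) := by
          rw [hmid.2]
          exact_mod_cast congrArg (fun (n : Nat) => (n : Int))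
            (countP_off need (fun k => f k - (if k = o then 1 else 0))
              (fun k => pvWinCnt discount (a + 1).toNat k) e hek
              (fun k hk => by simp [hg2 k, hk])).symm
        simp only [hce, Bool.false_eq_true, if_false]
        rw [ih (a + 1) _ _ _ (by omega) (by omega) hcnt2 hsat2]
        by_cases hok : pvOK need.items discount a = true <;> simp [hok] <;> push_cast <;> ring

    · -- last window: the loop ends after this step
      have hstep : stepB need (need.size : Int) (discount.length : Int) discount (days, cnt, sat) a
          = ((if pvOK need.items discount a then days + 1 else days), cnt, sat) := by
        unfold stepB
        simp only [hdays, hsh, if_false]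
      rw [hstep]
      have hnil : PySem.List.pyRange (a + 1) ((discount.length : Int) - 9) = [] :=
        PySem.List.pyRange_one_eq_nil (by omega)
      rw [hnil]
      simp only [List.foldl_nil, List.countP_nil]
      by_cases hok : pvOK need.items discount a = true <;> simp [hok]

theorem solution_alt_eq_spec (want : List String) (number : List Int) (discount : List String) :
    solution_alt want number discount =
      ((PySem.List.pyRange 0 ((discount.length : Int) - 9) 1).countP
        (pvOK (pvNeed want number).items discount) : Int) := by
  unfold solution_alt
  simp only [PySem.List.len_eq]
  rw [show (want.zip number).foldl (fun d p => d.insert p.1 p.2) PySem.Dict.empty = pvNeed want number from rfl]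
  rw [PySem.List.slice_to discount (by norm_num), show (10:Int).toNat = 10 from rfl]
  have hsplit : List.foldl (fun (st : PySem.Dict String Int × Int) p =>
        (st.1.insert p.1 0, if p.2 ≤ 0 then st.2 + 1 else st.2)) (PySem.Dict.empty, 0)
        (pvNeed want number).items
      = ((pvNeed want number).items.foldl (fun (d : PySem.Dict String Int) (p : String × Int) => d.insert p.1 0) PySem.Dict.empty,
         (pvNeed want number).items.foldl (fun (s : Int) (p : String × Int) => if p.2 ≤ 0 then s + 1 else s) 0) :=
    PySem.List.foldl_prod_mk (f := fun (d : PySem.Dict String Int) (p : String × Int) => d.insert p.1 0)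
      (g := fun (s : Int) (p : String × Int) => if p.2 ≤ 0 then s + 1 else s) _ _ _
  rw [hsplit]
  set need := pvNeed want number with hneed
  have hnd : need.keys.Nodup := pvNeed_nodup want number
  have hcnt0 : ∀ k ∈ need.keys,
      (need.items.foldl (fun (d : PySem.Dict String Int) (p : String × Int) => d.insert p.1 0) PySem.Dict.empty).getD k 0
        = ((List.count k ([] : List String) : Nat) : Int) := by
    intro k _
    simpa using getD_foldl_insert_zero need.items PySem.Dict.empty (fun k => PySem.Dict.getD_empty k 0) k
  have hsat0 : need.items.foldl (fun (s : Int) (p : String × Int) => if p.2 ≤ 0 then s + 1 else s) 0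
      = (need.items.countP (fun p => decide (p.2 ≤ ((List.count p.1 ([] : List String) : Nat) : Int))) : Int) := by
    rw [PySem.List.foldl_ite_add_one (fun (p : String × Int) => p.2 ≤ 0) need.items 0]
    simp
  obtain ⟨hc1, hc2⟩ := B0_loop need hnd (discount.take 10) [] _ _ hcnt0 hsat0
  simp only [List.nil_append] at hc1 hc2
  have hcnt1 : ∀ k ∈ need.keys,
      ((discount.take 10).foldl (stepB0 need)
        (need.items.foldl (fun (d : PySem.Dict String Int) (p : String × Int) => d.insert p.1 0) PySem.Dict.empty,
         need.items.foldl (fun (s : Int) (p : String × Int) => if p.2 ≤ 0 then s + 1 else s) 0)).1.getD k 0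
      = pvWinCnt discount (0 : Int).toNat k := by
    intro k hk
    rw [hc1 k hk]
    unfold pvWinCnt
    norm_num
  have hsat1 : ((discount.take 10).foldl (stepB0 need)
        (need.items.foldl (fun (d : PySem.Dict String Int) (p : String × Int) => d.insert p.1 0) PySem.Dict.empty,
         need.items.foldl (fun (s : Int) (p : String × Int) => if p.2 ≤ 0 then s + 1 else s) 0)).2
      = (need.items.countP (fun p => decide (p.2 ≤ pvWinCnt discount (0 : Int).toNat p.1)) : Int) := by
    rw [hc2]
    simp only [pvWinCnt, Int.toNat_zero, List.drop_zero]
    rfl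
  rw [B_loop need hnd discount (((discount.length : Int) - 9) - 0).toNat 0 0 _ _ (by omega) (by omega) hcnt1 hsat1]
  omega

-- ===== VERDICT (by name: the statement is the Claim_ definition above) =====
theorem solution_spec : Claim_equal_solution := by
  intro want number discount _ hpre
  unfold Spec_solution
  rw [solution_eq_spec want number discount hpre, solution_alt_eq_spec]
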